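-- pv_equiv track=rewrite | github.com/marcosd4h/DeepExtractRuntime | skills/state-machine-extractor/scripts/extract_dispatch_table.py | _pick_primary_handler
-- ===== SOURCE A (Python) =====
-- from typing import Optional
--
-- def _pick_primary_handler(calls: list[str], xref_map: dict[str, dict]) -> Optional[str]:
--     """Pick the most likely handler from a list of function calls.
--
--     Prefers internal functions over APIs, named functions over sub_ names.
--     """
--     if not calls:
--         return None
--
--     # Rank: internal named > internal sub_ > external
--     scored = []
--     for name in calls:
--         xref = xref_map.get(name, {})
--         fid = xref.get("function_id")
--         ftype = xref.get("function_type", 0)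
--         is_internal = fid is not None
--         is_named = not name.startswith("sub_")
--         score = 0
--         if is_internal and is_named:
--             score = 3
--         elif is_internal:
--             score = 2
--         elif is_named and ftype != 4:  # not data
--             score = 1
--         scored.append((score, name))
--
--     scored.sort(key=lambda x: x[0], reverse=True)
--     return scored[0][1] if scored else calls[0]
-- ===== SOURCE B (Python) =====
-- from typing import Optional
--
-- def _pick_primary_handler(calls: list[str], xref_map: dict[str, dict]) -> Optional[str]:
--     """Pick the most likely handler from a list of function calls.
--
--     One linear pass remembering the FIRST call of each rank class
--     (internal named / internal sub_ / external named non-data); no scores,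
--     no sort. Equivalent to A because the head of A's stable descending
--     sort is the first call attaining the maximum rank, i.e. the first
--     member of the highest non-empty class (or calls[0] if all rank 0).
--     """
--     if not calls:
--         return None
--
--     first_internal_named = None
--     first_internal_sub = None
--     first_external_named = None
--     for name in calls:
--         xref = xref_map.get(name, {})
--         internal = xref.get("function_id") is not None
--         named = not name.startswith("sub_")
--         if internal and named:
--             if first_internal_named is None:
--                 first_internal_named = name
--         elif internal:
--             if first_internal_sub is None:
--                 first_internal_sub = name
--         elif named and xref.get("function_type", 0) != 4:
--             if first_external_named is None:
--                 first_external_named = name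
--
--     for candidate in (first_internal_named, first_internal_sub, first_external_named):
--         if candidate is not None:
--             return candidate
--     return calls[0]
-- ===== Notes on version B (the rewrite author's own statement) =====
-- stated objective: alternative
-- what changed: Replaced building a (score, name) list and stably sorting it in descending order with a single bucket pass that remembers the first call of each rank class and returns the first member of the highest non-empty class; no scores, no sort.
import Mathlib
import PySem

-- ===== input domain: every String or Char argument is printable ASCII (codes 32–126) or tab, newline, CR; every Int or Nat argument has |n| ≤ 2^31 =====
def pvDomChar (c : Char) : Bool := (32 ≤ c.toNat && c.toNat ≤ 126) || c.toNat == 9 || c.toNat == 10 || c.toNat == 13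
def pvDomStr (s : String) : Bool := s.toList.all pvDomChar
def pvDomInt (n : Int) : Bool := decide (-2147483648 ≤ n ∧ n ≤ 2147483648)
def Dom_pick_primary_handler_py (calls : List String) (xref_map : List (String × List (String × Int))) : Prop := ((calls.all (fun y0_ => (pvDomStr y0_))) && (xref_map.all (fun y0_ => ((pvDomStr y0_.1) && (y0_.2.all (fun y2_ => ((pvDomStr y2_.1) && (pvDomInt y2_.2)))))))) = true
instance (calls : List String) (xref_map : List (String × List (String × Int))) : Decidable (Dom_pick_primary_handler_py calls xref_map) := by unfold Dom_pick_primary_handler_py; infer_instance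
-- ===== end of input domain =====

-- B replaces A's score-list build + stable descending sort + head by one
-- bucket pass keeping the first call of each rank class; objective: alternative.


-- ===== PORT A =====
-- A's loop body: score of one call name (internal named > internal sub_ > external non-data)
def pvScoreA (xref_map : List (String × List (String × Int))) (name : String) : Int :=
  let xref : List (String × Int) := PySem.Dict.getD (PySem.Dict.mk xref_map) name []
  let fid := PySem.Dict.get? (PySem.Dict.mk xref) "function_id"
  let ftype := PySem.Dict.getD (PySem.Dict.mk xref) "function_type" 0
  let is_internal := fid.isSome
  let is_named := !(PySem.Str.startswith name "sub_")
  if is_internal && is_named then 3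
  else if is_internal then 2
  else if is_named && decide (ftype ≠ 4) then 1
  else 0

def pick_primary_handler_py (calls : List String) (xref_map : List (String × List (String × Int))) : Option String :=
  if calls.isEmpty then none
  else
    let scored := calls.foldl (fun acc name => acc ++ [(pvScoreA xref_map name, name)]) []
    let sortedScored := PySem.List.sorted scored (fun p => p.1) true
    if !scored.isEmpty then sortedScored.head?.map (fun p => p.2)
    else calls.head?

-- ===== PORT B =====
-- B's loop body: fill the first still-empty bucket matching this name's class.
-- State: (first_internal_named, first_internal_sub, first_external_named).
def pvBucketStep (xref_map : List (String × List (String × Int)))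
    (s : Option String × Option String × Option String) (name : String) :
    Option String × Option String × Option String :=
  let xref : List (String × Int) := PySem.Dict.getD (PySem.Dict.mk xref_map) name []
  let internal := (PySem.Dict.get? (PySem.Dict.mk xref) "function_id").isSome
  let named := !(PySem.Str.startswith name "sub_")
  if internal && named then
    (if s.1.isSome then s else (some name, s.2.1, s.2.2))
  else if internal then
    (if s.2.1.isSome then s else (s.1, some name, s.2.2))
  else if named && decide (PySem.Dict.getD (PySem.Dict.mk xref) "function_type" 0 ≠ 4) then
    (if s.2.2.isSome then s else (s.1, s.2.1, some name))
  else s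

def pick_primary_handler_py_alt (calls : List String) (xref_map : List (String × List (String × Int))) : Option String :=
  match calls with
  | [] => none
  | c :: _ =>
    let s := calls.foldl (pvBucketStep xref_map) (none, none, none)
    if s.1.isSome then s.1
    else if s.2.1.isSome then s.2.1
    else if s.2.2.isSome then s.2.2
    else some c

-- ===== PRECONDITION & SPEC =====
def Spec_pick_primary_handler_py (calls : List String) (xref_map : List (String × List (String × Int))) (out : Option String) : Prop := out = pick_primary_handler_py_alt calls xref_map
instance (calls : List String) (xref_map : List (String × List (String × Int))) (out : Option String) : Decidable (Spec_pick_primary_handler_py calls xref_map out) := by unfold Spec_pick_primary_handler_py; infer_instance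

-- ===== CLAIM (what is proved, stated in full; the proofs are below) =====
def Claim_equal_pick_primary_handler_py : Prop := ∀ (calls : List String) (xref_map : List (String × List (String × Int))), Dom_pick_primary_handler_py calls xref_map → Spec_pick_primary_handler_py calls xref_map (pick_primary_handler_py calls xref_map)

-- ===== LEMMAS AND PROOFS =====

-- selection of the highest non-empty bucket, defaulting to d
def pvSel (s : Option String × Option String × Option String) (d : String) : String :=
  s.1.getD (s.2.1.getD (s.2.2.getD d))

-- rank of the highest non-empty bucket
def pvTop (s : Option String × Option String × Option String) : Int :=
  if s.1.isSome then 3 else if s.2.1.isSome then 2 else if s.2.2.isSome then 1 else 0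

theorem pvScoreA_cases (m : List (String × List (String × Int))) (n : String) :
    pvScoreA m n = 3 ∨ pvScoreA m n = 2 ∨ pvScoreA m n = 1 ∨ pvScoreA m n = 0 := by
  simp only [pvScoreA]; split_ifs <;> simp

-- B's step, rephrased by the score class of the incoming name
theorem pvBucketStep_eq_cat (m : List (String × List (String × Int)))
    (s : Option String × Option String × Option String) (n : String) :
    pvBucketStep m s n =
      (if pvScoreA m n = 3 then (if s.1.isSome then s else (some n, s.2.1, s.2.2))
       else if pvScoreA m n = 2 then (if s.2.1.isSome then s else (s.1, some n, s.2.2))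
       else if pvScoreA m n = 1 then (if s.2.2.isSome then s else (s.1, s.2.1, some n))
       else s) := by
  simp only [pvBucketStep, pvScoreA]
  split_ifs <;> simp_all

-- running first-max step used by PySem.List.max?
def pvMaxStep (m : List (String × List (String × Int))) (o : Option String) (y : String) : Option String :=
  match o with
  | none => some y
  | some x => if pvScoreA m x < pvScoreA m y then some y else some x

-- head of a stable descending insertion step = running-first-max step
theorem head?_insertBy {α : Type} (key : α → Int) (x : α) (acc : List α) :
    (PySem.List.insertBy (fun a b => decide (key b < key a)) x acc).head? =
      (match acc.head? with
        | none => some x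
        | some m => if key m < key x then some x else some m) := by
  cases acc with
  | nil => simp [PySem.List.insertBy]
  | cons y ys =>
    simp only [PySem.List.insertBy, List.head?_cons]
    split <;> simp_all

theorem head?_foldl_insertBy {α : Type} (key : α → Int) (xs : List α) (acc : List α) :
    (xs.foldl (fun acc x => PySem.List.insertBy (fun a b => decide (key b < key a)) x acc) acc).head? =
      xs.foldl (fun o x =>
        (match o with
          | none => some x
          | some m => if key m < key x then some x else some m)) acc.head? := by
  induction xs generalizing acc with
  | nil => rfl
  | cons x xs ih =>
    simp only [List.foldl_cons]
    rw [ih, head?_insertBy]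

-- head of Python's stable reverse sort is Python's max (first extremal element)
theorem head?_sorted_rev {α : Type} (key : α → Int) (xs : List α) :
    (PySem.List.sorted xs key true).head? = PySem.List.max? xs key := by
  rw [PySem.List.sorted_rev_eq_foldl_insertBy, head?_foldl_insertBy]
  rfl

theorem foldl_max_step_map {α β : Type} (key : β → Int) (f : α → β) (xs : List α)
    (a : Option α) :
    xs.foldl (fun o x =>
        (match o with
          | none => some (f x)
          | some m => if key m < key (f x) then some (f x) else some m)) (a.map f) =
      (xs.foldl (fun o x =>
        (match o with
          | none => some x
          | some m => if key (f m) < key (f x) then some x else some m)) a).map f := by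
  induction xs generalizing a with
  | nil => rfl
  | cons x xs ih =>
    simp only [List.foldl_cons]
    rw [← ih]
    congr 1
    cases a with
    | none => rfl
    | some m => simp only [Option.map_some]; split <;> rfl

-- max over a mapped list, keyed on the first projection
theorem max?_map {α β : Type} (key : β → Int) (f : α → β) (xs : List α) :
    PySem.List.max? (xs.map f) key = (PySem.List.max? xs (fun x => key (f x))).map f := by
  unfold PySem.List.max?
  rw [List.foldl_map]
  exact foldl_max_step_map key f xs none

-- main invariant: if x is the selection of state s and its score is s's top
-- rank, then the first-max fold and the bucket fold stay in lock step
theorem pvInv (m : List (String × List (String × Int))) (d : String) :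
    ∀ (cs : List String) (s : Option String × Option String × Option String) (x : String),
      x = pvSel s d → pvScoreA m x = pvTop s →
      cs.foldl (pvMaxStep m) (some x) =
        some (pvSel (cs.foldl (pvBucketStep m) s) d) := by
  intro cs
  induction cs with
  | nil => intro s x h1 h2; simp [h1]
  | cons y ys ih =>
    intro s x h1 h2
    rcases s with ⟨b3, b2, b1⟩
    simp only [List.foldl_cons]
    rw [pvBucketStep_eq_cat]
    rcases pvScoreA_cases m y with hy | hy | hy | hy <;>
      rcases b3 with _ | v3 <;> rcases b2 with _ | v2 <;> rcases b1 with _ | v1 <;>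
      simp [pvSel, pvTop] at h1 h2 <;>
      subst h1 <;>
      simp [hy, pvMaxStep] <;>
      (try split_ifs with hlt) <;>
      first
        | (exfalso; omega)
        | exact ih _ _ rfl (by simp [pvTop, hy, h2])

-- base case: after processing the head c from the empty state, the
-- invariant's hypotheses hold with x = c
theorem pvBase (m : List (String × List (String × Int))) (c : String) :
    c = pvSel (pvBucketStep m (none, none, none) c) c ∧
      pvScoreA m c = pvTop (pvBucketStep m (none, none, none) c) := by
  rw [pvBucketStep_eq_cat]
  rcases pvScoreA_cases m c with hc | hc | hc | hc <;>
    simp [pvSel, pvTop, hc]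

-- B's final if-chain is pvSel
theorem pvAlt_eq_sel (calls : List String) (m : List (String × List (String × Int)))
    (c : String) (cs : List String) (h : calls = c :: cs) :
    pick_primary_handler_py_alt calls m =
      some (pvSel (calls.foldl (pvBucketStep m) (none, none, none)) c) := by
  subst h
  simp only [pick_primary_handler_py_alt]
  rcases (c :: cs).foldl (pvBucketStep m) (none, none, none) with ⟨b3, b2, b1⟩
  rcases b3 with _ | v3 <;> rcases b2 with _ | v2 <;> rcases b1 with _ | v1 <;>
    simp [pvSel]

-- ===== VERDICT (by name: the statement is the Claim_ definition above) =====
theorem pick_primary_handler_py_spec : Claim_equal_pick_primary_handler_py := by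
  intro calls xref_map _
  unfold Spec_pick_primary_handler_py pick_primary_handler_py
  cases calls with
  | nil => rfl
  | cons c cs =>
    simp only [List.isEmpty_cons, Bool.false_eq_true, if_false]
    rw [PySem.List.foldl_append_singleton_eq_map, List.nil_append]
    have hne : (((c :: cs).map (fun name => (pvScoreA xref_map name, name))).isEmpty) = false := by
      simp
    rw [hne]
    simp only [Bool.not_false, if_true]
    rw [head?_sorted_rev, max?_map]
    rw [pvAlt_eq_sel (c :: cs) xref_map c cs rfl]
    have hmax : PySem.List.max? (c :: cs) (fun x => pvScoreA xref_map x) =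
        cs.foldl (pvMaxStep xref_map) (some c) := by
      unfold PySem.List.max?
      simp only [List.foldl_cons]
      congr 1
      funext o z
      cases o <;> rfl
    rw [hmax]
    obtain ⟨h1, h2⟩ := pvBase xref_map c
    rw [show (c :: cs).foldl (pvBucketStep xref_map) (none, none, none) =
          cs.foldl (pvBucketStep xref_map) (pvBucketStep xref_map (none, none, none) c) from rfl]
    rw [pvInv xref_map c cs _ c h1 h2]
    rfl
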